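-- pv_equiv track=rewrite | github.com/harshitpatni1002/khoj-resume | app1.py | analyze_skills
-- ===== SOURCE A (Python) =====
-- def analyze_skills(resume_data):
--     """Analyze the skills in the resume and return recommended skills, field, and courses."""
--
--     # Example: Analyze skills in the resume
--     skills = resume_data.get("skills", [])
--
--     # Define recommended skills and courses based on the user's skills
--     recommended_skills = []
--     reco_field = "Unknown"
--     rec_course = []
--
--     if "python" in [s.lower() for s in skills]:
--         recommended_skills = ["Machine Learning", "Data Science", "Artificial Intelligence"]
--         reco_field = "Data Science"
--         rec_course = [("Python for Data Science - Coursera", "https://www.coursera.org/courses?query=python%20for%20data%20science"),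
--                       ("AI for Everyone - Coursera", "https://www.coursera.org/learn/ai-for-everyone")]
--     elif "java" in [s.lower() for s in skills]:
--         recommended_skills = ["Java Development", "Spring Framework", "Web Development"]
--         reco_field = "Software Development"
--         rec_course = [("Java Programming - Udemy", "https://www.udemy.com/course/java-programming/"),
--                       ("Spring Framework for Beginners - Udemy", "https://www.udemy.com/course/spring-framework-for-beginners/")]
--     elif "web development" in [s.lower() for s in skills]:
--         recommended_skills = ["HTML", "CSS", "JavaScript", "React", "Node.js"]
--         reco_field = "Web Development"
--         rec_course = [("The Web Developer Bootcamp - Udemy", "https://www.udemy.com/course/the-web-developer-bootcamp/"),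
--                       ("React - Full Course - Codecademy", "https://www.codecademy.com/learn/react-101")]
--
--     # You can add more skills and fields as per your needs
--
--     return recommended_skills, reco_field, rec_course
-- ===== SOURCE B (Python) =====
-- # Min-rank rewrite: one pass assigns each skill a priority rank; the answer is
-- # indexed by the minimum rank seen (3 = no keyword), instead of membership tests.
-- _RANK = {"python": 0, "java": 1, "web development": 2}
--
-- _OUTCOMES = [
--     (["Machine Learning", "Data Science", "Artificial Intelligence"],
--      "Data Science",
--      [("Python for Data Science - Coursera", "https://www.coursera.org/courses?query=python%20for%20data%20science"),
--       ("AI for Everyone - Coursera", "https://www.coursera.org/learn/ai-for-everyone")]),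
--     (["Java Development", "Spring Framework", "Web Development"],
--      "Software Development",
--      [("Java Programming - Udemy", "https://www.udemy.com/course/java-programming/"),
--       ("Spring Framework for Beginners - Udemy", "https://www.udemy.com/course/spring-framework-for-beginners/")]),
--     (["HTML", "CSS", "JavaScript", "React", "Node.js"],
--      "Web Development",
--      [("The Web Developer Bootcamp - Udemy", "https://www.udemy.com/course/the-web-developer-bootcamp/"),
--       ("React - Full Course - Codecademy", "https://www.codecademy.com/learn/react-101")]),
--     ([], "Unknown", []),
-- ]
--
-- def analyze_skills(resume_data):
--     """Analyze the skills in the resume and return recommended skills, field, and courses."""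
--     best = 3
--     for s in resume_data.get("skills", []):
--         r = _RANK.get(s.lower(), 3)
--         if r < best:
--             best = r
--     return _OUTCOMES[best]
-- ===== Notes on version B (the rewrite author's own statement) =====
-- stated objective: alternative
-- what changed: Replaces A's if/elif cascade of membership tests (each rebuilding the lowercased list) with a single pass that maps every skill to a priority rank, takes the minimum rank, and indexes a 4-entry outcome table with it.
import Mathlib
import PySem

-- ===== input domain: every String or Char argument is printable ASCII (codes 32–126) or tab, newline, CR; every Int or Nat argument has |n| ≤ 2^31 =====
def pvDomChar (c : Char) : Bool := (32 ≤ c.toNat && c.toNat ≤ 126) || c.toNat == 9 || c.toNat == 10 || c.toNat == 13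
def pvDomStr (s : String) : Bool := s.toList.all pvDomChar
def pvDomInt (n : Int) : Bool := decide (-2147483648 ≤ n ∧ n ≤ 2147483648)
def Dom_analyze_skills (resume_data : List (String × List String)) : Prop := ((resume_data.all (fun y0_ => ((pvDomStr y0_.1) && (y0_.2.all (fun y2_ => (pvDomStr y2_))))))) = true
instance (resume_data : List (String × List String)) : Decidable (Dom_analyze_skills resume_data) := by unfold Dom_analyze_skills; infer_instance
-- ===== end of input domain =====

-- B computes a minimum priority rank in one pass and indexes an outcome table, instead of A's if/elif membership cascade (objective: alternative).


-- ===== PORT A =====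
def analyze_skills (resume_data : List (String × List String)) : List String × String × (List (String × String)) :=
  let skills := (PySem.Dict.mk resume_data).getD "skills" []
  if (skills.map PySem.Str.lower).contains "python" then
    (["Machine Learning", "Data Science", "Artificial Intelligence"],
     "Data Science",
     [("Python for Data Science - Coursera", "https://www.coursera.org/courses?query=python%20for%20data%20science"),
      ("AI for Everyone - Coursera", "https://www.coursera.org/learn/ai-for-everyone")])
  else if (skills.map PySem.Str.lower).contains "java" then
    (["Java Development", "Spring Framework", "Web Development"],
     "Software Development",
     [("Java Programming - Udemy", "https://www.udemy.com/course/java-programming/"),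
      ("Spring Framework for Beginners - Udemy", "https://www.udemy.com/course/spring-framework-for-beginners/")])
  else if (skills.map PySem.Str.lower).contains "web development" then
    (["HTML", "CSS", "JavaScript", "React", "Node.js"],
     "Web Development",
     [("The Web Developer Bootcamp - Udemy", "https://www.udemy.com/course/the-web-developer-bootcamp/"),
      ("React - Full Course - Codecademy", "https://www.codecademy.com/learn/react-101")])
  else ([], "Unknown", [])

-- ===== PORT B =====
def pvRankDict : PySem.Dict String Nat :=
  PySem.Dict.mk [("python", 0), ("java", 1), ("web development", 2)]

def pvOutcomes : List (List String × String × (List (String × String))) :=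
  [(["Machine Learning", "Data Science", "Artificial Intelligence"],
    "Data Science",
    [("Python for Data Science - Coursera", "https://www.coursera.org/courses?query=python%20for%20data%20science"),
     ("AI for Everyone - Coursera", "https://www.coursera.org/learn/ai-for-everyone")]),
   (["Java Development", "Spring Framework", "Web Development"],
    "Software Development",
    [("Java Programming - Udemy", "https://www.udemy.com/course/java-programming/"),
     ("Spring Framework for Beginners - Udemy", "https://www.udemy.com/course/spring-framework-for-beginners/")]),
   (["HTML", "CSS", "JavaScript", "React", "Node.js"],
    "Web Development",
    [("The Web Developer Bootcamp - Udemy", "https://www.udemy.com/course/the-web-developer-bootcamp/"),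
     ("React - Full Course - Codecademy", "https://www.codecademy.com/learn/react-101")]),
   ([], "Unknown", [])]

def analyze_skills_alt (resume_data : List (String × List String)) : List String × String × (List (String × String)) :=
  let skills := (PySem.Dict.mk resume_data).getD "skills" []
  let best := skills.foldl
    (fun best s =>
      let r := pvRankDict.getD (PySem.Str.lower s) 3
      if r < best then r else best) 3
  pvOutcomes.getD best ([], "Unknown", [])

-- ===== PRECONDITION & SPEC =====
def Spec_analyze_skills (resume_data : List (String × List String)) (out : List String × String × (List (String × String))) : Prop := out = analyze_skills_alt resume_data
instance (resume_data : List (String × List String)) (out : List String × String × (List (String × String))) : Decidable (Spec_analyze_skills resume_data out) := by unfold Spec_analyze_skills; infer_instance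

-- ===== CLAIM (what is proved, stated in full; the proofs are below) =====
def Claim_equal_analyze_skills : Prop := ∀ (resume_data : List (String × List String)), Dom_analyze_skills resume_data → Spec_analyze_skills resume_data (analyze_skills resume_data)

-- ===== LEMMAS AND PROOFS =====

-- proof helper: the per-skill step of B's loop, with the let inlined
def pvStep (best : Nat) (s : String) : Nat :=
  if pvRankDict.getD (PySem.Str.lower s) 3 < best then
    pvRankDict.getD (PySem.Str.lower s) 3
  else best
def pvBest (skills : List String) : Nat := skills.foldl pvStep 3
theorem pvRank_eq (t : String) :
    pvRankDict.getD t 3 =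
      (if t = "python" then 0 else if t = "java" then 1
       else if t = "web development" then 2 else 3) := by
  simp only [pvRankDict, PySem.Dict.getD, PySem.Dict.get?, List.find?, beq_eq_decide]
  by_cases h1 : t = "python" <;> by_cases h2 : t = "java" <;>
    by_cases h3 : t = "web development" <;>
      simp [h1, h2, h3, eq_comm]
theorem pvRank_le (s : String) : pvRankDict.getD (PySem.Str.lower s) 3 ≤ 3 := by
  rw [pvRank_eq]; split_ifs <;> omega
theorem pvStep_le (r0 : Nat) (s : String) (h : r0 ≤ 3) : pvStep r0 s ≤ 3 := by
  have := pvRank_le s; unfold pvStep; split_ifs <;> omega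
theorem pvBest_acc (skills : List String) (r0 : Nat) (h : r0 ≤ 3) :
    skills.foldl pvStep r0 = min r0 (pvBest skills) := by
  induction skills generalizing r0 with
  | nil => simp [pvBest, List.foldl]; omega
  | cons s xs ih =>
      have hr := pvRank_le s
      have e1 := ih (pvStep r0 s) (pvStep_le r0 s h)
      have e2 := ih (pvStep 3 s) (pvStep_le 3 s (by omega))
      have e3 : pvBest (s :: xs) = min (pvStep 3 s) (pvBest xs) := by
        show List.foldl pvStep 3 (s :: xs) = _
        rw [List.foldl_cons]; exact e2
      show (s :: xs).foldl pvStep r0 = min r0 (pvBest (s :: xs))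
      rw [List.foldl_cons, e1, e3]
      simp only [pvStep]
      split_ifs <;> omega
theorem pvBest_cons (s : String) (xs : List String) :
    pvBest (s :: xs) = min (pvRankDict.getD (PySem.Str.lower s) 3) (pvBest xs) := by
  have hr := pvRank_le s
  have e3 : pvBest (s :: xs) = min (pvStep 3 s) (pvBest xs) := by
    show List.foldl pvStep 3 (s :: xs) = _
    rw [List.foldl_cons]; exact pvBest_acc xs _ (pvStep_le 3 s (by omega))
  rw [e3]
  simp only [pvStep]
  split_ifs <;> omega
theorem pvBest_char (skills : List String) :
    pvBest skills =
      (if (skills.map PySem.Str.lower).contains "python" then 0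
       else if (skills.map PySem.Str.lower).contains "java" then 1
       else if (skills.map PySem.Str.lower).contains "web development" then 2
       else 3) := by
  induction skills with
  | nil => simp [pvBest, List.foldl]
  | cons s xs ih =>
      rw [pvBest_cons, ih, pvRank_eq]
      simp only [List.map_cons, List.contains_cons]
      have b1 : ("python" == PySem.Str.lower s) = decide (PySem.Str.lower s = "python") := by
        by_cases h : PySem.Str.lower s = "python" <;> simp [h] <;> exact fun e => h e.symm
      have b2 : ("java" == PySem.Str.lower s) = decide (PySem.Str.lower s = "java") := by
        by_cases h : PySem.Str.lower s = "java" <;> simp [h] <;> exact fun e => h e.symm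
      have b3 : ("web development" == PySem.Str.lower s) = decide (PySem.Str.lower s = "web development") := by
        by_cases h : PySem.Str.lower s = "web development" <;> simp [h] <;> exact fun e => h e.symm
      rw [b1, b2, b3]
      by_cases h1 : PySem.Str.lower s = "python" <;>
        by_cases h2 : PySem.Str.lower s = "java" <;>
          by_cases h3 : PySem.Str.lower s = "web development" <;>
            by_cases c1 : ∃ a ∈ xs, PySem.Str.lower a = "python" <;>
              by_cases c2 : ∃ a ∈ xs, PySem.Str.lower a = "java" <;>
                by_cases c3 : ∃ a ∈ xs, PySem.Str.lower a = "web development" <;>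
                  simp [h1, h2, h3, c1, c2, c3]

-- ===== VERDICT (by name: the statement is the Claim_ definition above) =====
theorem analyze_skills_spec : Claim_equal_analyze_skills := by
  intro resume_data _
  unfold Spec_analyze_skills
  have halt : analyze_skills_alt resume_data =
      pvOutcomes.getD (pvBest ((PySem.Dict.mk resume_data).getD "skills" []))
        ([], "Unknown", []) := rfl
  rw [halt, pvBest_char]
  simp only [analyze_skills]
  split_ifs <;> rfl
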